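-- pv_equiv track=rewrite | github.com/leokhachatorians/Markov_Bot | main.py | create_word_pairs
-- ===== SOURCE A (Python) =====
-- def create_word_pairs(text):
-- 	"""
-- 	Go through the supplied text and create our 'word pairs',
-- 	its actually a dictinary of: 'word:[list of words]'' pairs, but you
-- 	get the idea.
-- 	"""
-- 	all_pairs = {}
--
-- 	for word in range(len(text) - 1):
-- 		if text[word] not in all_pairs:
-- 			all_pairs[text[word]] = [text[word + 1]]
-- 		else:
-- 			all_pairs[text[word]] += [text[word + 1]]
--
-- 	return all_pairs
-- ===== SOURCE B (Python) =====
-- def create_word_pairs(text):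
--     seen = dict.fromkeys(text[:-1])
--     return {w: [text[i + 1] for i in range(len(text) - 1) if text[i] == w]
--             for w in seen}
-- ===== Notes on version B (the rewrite author's own statement) =====
-- stated objective: alternative
-- what changed: Replaces A's single membership-testing pass that grows each value list in a dict with a group-by: collect the distinct source words first (dict.fromkeys of text[:-1]) and build each word's successor list by one ordered scan of the indices per word.
import Mathlib
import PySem

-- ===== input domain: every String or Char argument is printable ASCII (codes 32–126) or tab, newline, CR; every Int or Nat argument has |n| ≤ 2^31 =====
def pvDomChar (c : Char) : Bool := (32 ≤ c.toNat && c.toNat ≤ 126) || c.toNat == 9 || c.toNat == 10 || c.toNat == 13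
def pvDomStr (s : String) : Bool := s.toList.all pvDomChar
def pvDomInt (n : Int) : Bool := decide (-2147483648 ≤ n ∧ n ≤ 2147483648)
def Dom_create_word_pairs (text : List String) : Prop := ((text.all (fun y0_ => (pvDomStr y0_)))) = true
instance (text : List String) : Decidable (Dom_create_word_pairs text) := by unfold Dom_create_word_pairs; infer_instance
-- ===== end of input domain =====

-- B builds the dict by group-by (distinct source words, then one ordered scan per word)
-- instead of A's single pass growing each value list; an alternative decomposition, not faster.

-- ===== PORT A =====
def create_word_pairs (text : List String) : List (String × List String) :=
  let all_pairs :=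
    (PySem.List.pyRange 0 ((text.length : Int) - 1) 1).foldl
      (fun d word =>
        if d.contains (PySem.List.pyGetD text word "") = false then
          d.insert (PySem.List.pyGetD text word "") [PySem.List.pyGetD text (word + 1) ""]
        else
          d.insert (PySem.List.pyGetD text word "")
            (d.getD (PySem.List.pyGetD text word "") [] ++ [PySem.List.pyGetD text (word + 1) ""]))
      PySem.Dict.empty
  all_pairs.items

-- ===== PORT B =====
def create_word_pairs_alt (text : List String) : List (String × List String) :=
  let seen := PySem.List.dedup (PySem.List.slice text none (some (-1)))
  seen.map (fun w =>
    (w, ((PySem.List.pyRange 0 ((text.length : Int) - 1) 1).filter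
           (fun i => PySem.List.pyGetD text i "" == w)).map
          (fun i => PySem.List.pyGetD text (i + 1) "")))

-- ===== PRECONDITION & SPEC =====
def Spec_create_word_pairs (text : List String) (out : List (String × List String)) : Prop := out = create_word_pairs_alt text
instance (text : List String) (out : List (String × List String)) : Decidable (Spec_create_word_pairs text out) := by unfold Spec_create_word_pairs; infer_instance

-- ===== CLAIM (what is proved, stated in full; the proofs are below) =====
def Claim_equal_create_word_pairs : Prop := ∀ (text : List String), Dom_create_word_pairs text → Spec_create_word_pairs text (create_word_pairs text)

-- ===== LEMMAS AND PROOFS =====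

-- A's loop body is exactly the modify-append grouping step.
theorem cwp_step_eq (d : PySem.Dict String (List String)) (k v : String) :
    (if d.contains k = false then d.insert k [v]
     else d.insert k (d.getD k [] ++ [v])) = d.modify k [] (· ++ [v]) := by
  by_cases h : d.contains k = false
  · simp [PySem.Dict.modify, PySem.Dict.getD_of_not_contains d [] h]
  · simp [h, PySem.Dict.modify]

-- reading the first m entries of xs by index is take m
theorem map_range_getD (xs : List String) (m : Nat) (h : m ≤ xs.length) :
    (List.range m).map (fun k => xs.getD k "") = xs.take m := by
  apply List.ext_getElem
  · simp [h]
  · intro i h1 h2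
    simp only [List.getD] at *
    simp at h1 h2 ⊢
    rw [List.getElem?_eq_getElem (by omega)]
    rfl

theorem cwp_sources (text : List String) :
    (PySem.List.pyRange 0 ((text.length : Int) - 1) 1).map
      (fun i => PySem.List.pyGetD text i "") = text.dropLast := by
  rcases text with _ | ⟨x, xs⟩
  · simp [PySem.List.pyRange_one_eq_nil]
  · rw [PySem.List.pyRange_one]
    simp only [sub_zero, List.map_map]
    have hl : (((x :: xs).length : Int) - 1).toNat = xs.length := by
      simp
    rw [hl]
    have : ∀ k ∈ List.range xs.length,
        ((fun i => PySem.List.pyGetD (x :: xs) i "") ∘ fun k : Nat => (0 : Int) + k) k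
        = (fun k : Nat => (x :: xs).getD k "") k := by
      intro k _
      simp [PySem.List.pyGetD_natCast]
    rw [List.map_congr_left this, map_range_getD _ _ (by simp),
        ]
    simp [List.dropLast_eq_take]

theorem create_word_pairs_eq (text : List String) :
    create_word_pairs text = create_word_pairs_alt text := by
  unfold create_word_pairs create_word_pairs_alt
  set R := PySem.List.pyRange 0 ((text.length : Int) - 1) 1 with hR
  set l := R.map (fun i =>
    (PySem.List.pyGetD text i "", PySem.List.pyGetD text (i + 1) "")) with hl
  -- rewrite A's fold as the canonical grouping fold over l
  have hfold :
      R.foldl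
        (fun d word =>
          if d.contains (PySem.List.pyGetD text word "") = false then
            d.insert (PySem.List.pyGetD text word "") [PySem.List.pyGetD text (word + 1) ""]
          else
            d.insert (PySem.List.pyGetD text word "")
              (d.getD (PySem.List.pyGetD text word "") []
                ++ [PySem.List.pyGetD text (word + 1) ""]))
        PySem.Dict.empty
      = l.foldl (fun d p => d.modify p.1 [] (· ++ [p.2])) PySem.Dict.empty := by
    rw [hl, List.foldl_map]
    exact List.foldl_ext _ _ _ (fun d i _ => cwp_step_eq d _ _)
  rw [hfold]
  set D := l.foldl (fun d p => d.modify p.1 [] (· ++ [p.2])) PySem.Dict.empty with hD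
  have hnd : D.keys.Nodup := by
    rw [hD]
    exact PySem.Dict.nodup_keys_foldl_modify_key l (·.1) [] (fun d p => (· ++ [p.2]))
      PySem.Dict.empty (by simp)
  have hkeys : D.keys = PySem.List.dedup text.dropLast := by
    rw [hD]
    rw [PySem.Dict.keys_foldl_modify_key]
    rw [PySem.List.dedup_eq_ofList, hl, List.map_map]
    have : l.map (·.1) = text.dropLast := by
      rw [hl, List.map_map]
      exact cwp_sources text
    rw [hl, List.map_map] at this
    simp only [PySem.Dict.keys_empty]
    rw [show ((fun p : String × String => p.1) ∘ fun i =>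
          (PySem.List.pyGetD text i "", PySem.List.pyGetD text (i + 1) "")) =
        fun i => PySem.List.pyGetD text i "" from rfl] at this ⊢
    rw [this]
    rfl
  rw [PySem.Dict.items_eq_map_keys D hnd [], hkeys, PySem.List.slice_to_neg_one]
  apply List.map_congr_left
  intro w _
  have hget : D.getD w [] = (l.filter (fun p => p.1 == w)).map (·.2) := by
    rw [hD, PySem.Dict.getD_foldl_modify_append]
    simp
  rw [hget, hl, List.filter_map, List.map_map]
  rfl

-- ===== VERDICT (by name: the statement is the Claim_ definition above) =====
theorem create_word_pairs_spec : Claim_equal_create_word_pairs := by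
  intro text _
  exact create_word_pairs_eq text
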